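-- pv_equiv track=rewrite | github.com/ArjunMD/FirstMonth | app.py | breast_side_status
-- ===== SOURCE A (Python) =====
-- from typing import Any, Dict, List, Optional
--
-- def _toggle_side(side: str) -> str:
--     return "R" if side == "L" else "L"
--
-- def breast_side_status(events: List[Dict[str, Any]]) -> tuple[Optional[str], str]:
--     """
--     Return (last_start_side, next_start_side) for breastfeeding events.
--
--     - Scans feeding events with feed_mode == "breast" in chronological order.
--     - If an older event is missing start_side, infer by alternating,
--       starting from "L" if no prior side is known.
--     - next_start_side is the opposite of the last inferred/known side,
--       or "L" if there have been no breastfeeds.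
--     """
--     breast_events = [
--         e
--         for e in sorted(events, key=lambda x: x.get("ts", ""))
--         if e.get("type") == "feeding" and e.get("feed_mode") == "breast"
--     ]
--
--     last: Optional[str] = None
--     seen_any = False
--
--     for e in breast_events:
--         seen_any = True
--         side = (e.get("start_side") or "").upper().strip()
--         if side in {"L", "R"}:
--             last = side
--         else:
--             last = "L" if last is None else _toggle_side(last)
--
--     if not seen_any:
--         return None, "L"
--
--     assert last in {"L", "R"}
--     return last, _toggle_side(last)
-- ===== SOURCE B (Python) =====
-- from typing import Any, Dict, List, Optional
--
-- def _toggle_side(side: str) -> str: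
--     return "R" if side == "L" else "L"
--
-- def breast_side_status(events: List[Dict[str, Any]]) -> tuple[Optional[str], str]:
--     breast_events = [
--         e
--         for e in sorted(events, key=lambda x: x.get("ts", ""))
--         if e.get("type") == "feeding" and e.get("feed_mode") == "breast"
--     ]
--     if not breast_events:
--         return None, "L"
--     # Scan backwards for the last event with a known side; count unknowns after it.
--     last: Optional[str] = None
--     m = 0
--     for e in reversed(breast_events):
--         side = (e.get("start_side") or "").upper().strip()
--         if side in {"L", "R"}:
--             last = side
--             break
--         m += 1
--     if last is None:
--         last = "L" if len(breast_events) % 2 == 1 else "R"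
--     elif m % 2 == 1:
--         last = _toggle_side(last)
--     return last, _toggle_side(last)
-- ===== Notes on version B (the rewrite author's own statement) =====
-- stated objective: alternative
-- what changed: Replaces A's forward fold that re-toggles an alternating side through every event with a single backward scan that stops at the last known side and derives the answer from the parity of the trailing-unknown count (or of the whole list if no side is known).
import Mathlib
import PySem

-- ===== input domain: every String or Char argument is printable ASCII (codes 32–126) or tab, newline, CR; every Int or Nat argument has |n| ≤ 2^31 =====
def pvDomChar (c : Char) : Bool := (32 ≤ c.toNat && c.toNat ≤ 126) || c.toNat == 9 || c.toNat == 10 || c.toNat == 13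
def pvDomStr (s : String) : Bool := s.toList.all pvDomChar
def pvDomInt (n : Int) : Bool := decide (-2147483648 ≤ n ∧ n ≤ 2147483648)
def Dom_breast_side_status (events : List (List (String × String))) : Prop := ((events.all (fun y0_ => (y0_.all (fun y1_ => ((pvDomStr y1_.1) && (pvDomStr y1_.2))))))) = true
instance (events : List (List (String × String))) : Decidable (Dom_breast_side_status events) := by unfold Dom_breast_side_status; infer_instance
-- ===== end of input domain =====

-- B replaces A's forward alternating fold by a backward scan to the last known side
-- plus a parity computation (objective: alternative decomposition, same cost).

-- ===== PORT A =====
-- e.get(k, d) / e.get(k) on the event dict (association list, first match)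
def pvGetD (e : List (String × String)) (k d : String) : String :=
  match e.find? (fun p => p.1 == k) with
  | some p => p.2
  | none => d

def pvGet? (e : List (String × String)) (k : String) : Option String :=
  match e.find? (fun p => p.1 == k) with
  | some p => some p.2
  | none => none

def _toggle_side (side : String) : String := if side == "L" then "R" else "L"

-- (e.get("start_side") or "").upper().strip()  ('or ""' is the identity on strings here: '' or '' = '')
def pvSideOf (e : List (String × String)) : String :=
  PySem.Str.strip (PySem.Str.upper (pvGetD e "start_side" ""))

def pvBreastEvents (events : List (List (String × String))) : List (List (String × String)) :=
  (PySem.List.sorted events (fun x => pvGetD x "ts" "")).filter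
    (fun e => pvGet? e "type" == some "feeding" && pvGet? e "feed_mode" == some "breast")

def breast_side_status (events : List (List (String × String))) : Option String × String :=
  let breast_events := pvBreastEvents events
  let st := breast_events.foldl
    (fun (st : Option String × Bool) e =>
      let side := pvSideOf e
      if side == "L" || side == "R" then (some side, true)
      else
        match st.1 with
        | none => (some "L", true)
        | some s => (some (_toggle_side s), true))
    (none, false)
  if st.2 = false then (none, "L")
  else (st.1, _toggle_side (st.1.getD ""))  -- the assert guarantees st.1 = some s here

-- ===== PORT B =====
-- backward scan: last known side (if any) and the number of unknown events after it
def pvScanBack : List (List (String × String)) → Option String × Nat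
  | [] => (none, 0)
  | e :: rest =>
    let side := pvSideOf e
    if side == "L" || side == "R" then (some side, 0)
    else
      let r := pvScanBack rest
      (r.1, r.2 + 1)

def breast_side_status_alt (events : List (List (String × String))) : Option String × String :=
  let breast_events := pvBreastEvents events
  if breast_events = [] then (none, "L")
  else
    let r := pvScanBack breast_events.reverse
    let last :=
      match r.1 with
      | none => if breast_events.length % 2 == 1 then "L" else "R"
      | some s => if r.2 % 2 == 1 then _toggle_side s else s
    (some last, _toggle_side last)

-- ===== PRECONDITION & SPEC =====
def Spec_breast_side_status (events : List (List (String × String))) (out : Option String × String) : Prop := out = breast_side_status_alt events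
instance (events : List (List (String × String))) (out : Option String × String) : Decidable (Spec_breast_side_status events out) := by unfold Spec_breast_side_status; infer_instance

-- ===== CLAIM (what is proved, stated in full; the proofs are below) =====
def Claim_equal_breast_side_status : Prop := ∀ (events : List (List (String × String))), Dom_breast_side_status events → Spec_breast_side_status events (breast_side_status events)

-- ===== LEMMAS AND PROOFS =====

-- A's loop step on the 'last' component only
def pvStep (last : Option String) (e : List (String × String)) : Option String :=
  let side := pvSideOf e
  if side == "L" || side == "R" then some side
  else
    match last with
    | none => some "L"
    | some s => some (_toggle_side s)

-- B's 'last' value for a nonempty breast-event list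
def pvBLast (l : List (List (String × String))) : String :=
  match (pvScanBack l.reverse).1 with
  | none => if l.length % 2 == 1 then "L" else "R"
  | some s => if (pvScanBack l.reverse).2 % 2 == 1 then _toggle_side s else s

lemma pvFoldPair (l : List (List (String × String))) (st : Option String × Bool) :
    l.foldl
      (fun (st : Option String × Bool) e =>
        let side := pvSideOf e
        if side == "L" || side == "R" then (some side, true)
        else
          match st.1 with
          | none => (some "L", true)
          | some s => (some (_toggle_side s), true))
      st
    = (l.foldl pvStep st.1, if l = [] then st.2 else true) := by
  induction l generalizing st with
  | nil => simp
  | cons e t ih =>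
    simp only [List.foldl_cons, ih]
    by_cases h : (pvSideOf e == "L" || pvSideOf e == "R") = true <;>
      rcases st with ⟨last, seen⟩ <;> cases last <;> simp [pvStep, h]

lemma pvScanSide (l : List (List (String × String))) (s : String)
    (h : (pvScanBack l).1 = some s) : (s == "L" || s == "R") = true := by
  induction l with
  | nil => simp [pvScanBack] at h
  | cons e t ih =>
    by_cases he : (pvSideOf e == "L" || pvSideOf e == "R") = true
    · simp [pvScanBack, he] at h
      rw [← h]; exact he
    · simp [pvScanBack, he] at h
      exact ih h

lemma pvToggleToggle (s : String) (h : (s == "L" || s == "R") = true) :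
    _toggle_side (_toggle_side s) = s := by
  rcases Bool.or_eq_true_iff.mp h with h' | h' <;>
    simp_all [_toggle_side]

lemma pvMain (l : List (List (String × String))) (hne : l ≠ []) :
    l.foldl pvStep none = some (pvBLast l) := by
  induction l using List.reverseRecOn with
  | nil => exact absurd rfl hne
  | append_singleton t e ih =>
    rw [List.foldl_append]
    by_cases he : (pvSideOf e == "L" || pvSideOf e == "R") = true
    · simp [List.foldl_cons, List.foldl_nil, pvStep, he, pvBLast, pvScanBack]
    · rcases eq_or_ne t [] with rfl | ht
      · simp [pvStep, he, pvBLast, pvScanBack]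
      · rw [ih ht]
        simp only [List.foldl_cons, List.foldl_nil, pvStep, he, Bool.false_eq_true, if_false]
        have hrev : (t ++ [e]).reverse = e :: t.reverse := by simp
        have hstep : pvScanBack (e :: t.reverse)
            = ((pvScanBack t.reverse).1, (pvScanBack t.reverse).2 + 1) := by
          simp [pvScanBack, he]
        unfold pvBLast
        rw [hrev, hstep]
        rcases hsc : pvScanBack t.reverse with ⟨lo, m⟩
        cases lo with
        | none =>
          have hlen : (t ++ [e]).length = t.length + 1 := by simp
          simp only [hlen]
          rcases Nat.even_or_odd t.length with hpar | hpar
          · have h1 : t.length % 2 = 0 := Nat.even_iff.mp hpar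
            have h2 : (t.length + 1) % 2 = 1 := by omega
            simp [h1, h2, _toggle_side]
          · have h1 : t.length % 2 = 1 := Nat.odd_iff.mp hpar
            have h2 : (t.length + 1) % 2 = 0 := by omega
            simp [h1, h2, _toggle_side]
        | some s =>
          have hs : (s == "L" || s == "R") = true := pvScanSide t.reverse s (by rw [hsc])
          rcases Nat.even_or_odd m with hpar | hpar
          · have h1 : m % 2 = 0 := Nat.even_iff.mp hpar
            have h2 : (m + 1) % 2 = 1 := by omega
            simp [h1, h2]
          · have h1 : m % 2 = 1 := Nat.odd_iff.mp hpar
            have h2 : (m + 1) % 2 = 0 := by omega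
            simp [h1, h2, pvToggleToggle s hs]

-- ===== VERDICT (by name: the statement is the Claim_ definition above) =====
theorem breast_side_status_spec : Claim_equal_breast_side_status := by
  intro events _
  unfold Spec_breast_side_status breast_side_status breast_side_status_alt
  simp only [pvFoldPair]
  rcases eq_or_ne (pvBreastEvents events) [] with hbe | hbe
  · simp [hbe]
  · rw [pvMain _ hbe]
    simp [hbe, pvBLast]
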